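-- pv_equiv track=rewrite | github.com/jima80525/markplates | markplates/__main__.py | remove_double_blanks
-- ===== SOURCE A (Python) =====
-- def remove_double_blanks(lines):
--     """ Takes a list of lines and condenses multiple blank lines into a single
--     blank line.
--     """
--     new_lines = []
--     prev_line = ""  # empty line here will remove leading blank space
--     for line in lines:
--         if len(line.strip()) or len(prev_line.strip()):
--             new_lines.append(line)
--         prev_line = line
--     return new_lines
-- ===== SOURCE B (Python) =====
-- def remove_double_blanks(lines):
--     """Condense runs of blank lines into one; run-based scan instead of
--     the per-line prev-state pass of the original."""
--     result = []
--     i, n = 0, len(lines)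
--     while i < n:
--         blank = not lines[i].strip()
--         j = i
--         while j < n and (not lines[j].strip()) == blank:
--             j += 1
--         if blank:
--             if result:
--                 result.append(lines[i])
--         else:
--             result.extend(lines[i:j])
--         i = j
--     return result
-- ===== Notes on version B (the rewrite author's own statement) =====
-- stated objective: alternative
-- what changed: B scans the list run-by-run (maximal runs of equal blankness found by an inner scan), copying non-blank runs whole and emitting only the first line of a blank run when output already exists, instead of A's per-line pass carrying the previous line as state.
import Mathlib
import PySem

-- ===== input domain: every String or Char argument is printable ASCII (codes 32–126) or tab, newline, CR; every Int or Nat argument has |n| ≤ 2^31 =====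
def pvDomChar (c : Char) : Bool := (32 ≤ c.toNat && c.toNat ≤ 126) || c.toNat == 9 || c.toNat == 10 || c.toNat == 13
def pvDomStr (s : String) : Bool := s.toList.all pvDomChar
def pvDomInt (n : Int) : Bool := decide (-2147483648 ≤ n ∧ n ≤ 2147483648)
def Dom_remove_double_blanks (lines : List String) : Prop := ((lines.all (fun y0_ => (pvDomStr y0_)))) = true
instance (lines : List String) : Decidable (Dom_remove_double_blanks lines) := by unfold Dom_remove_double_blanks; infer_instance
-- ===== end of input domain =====

set_option maxHeartbeats 4000000


-- B condenses blank runs by scanning run-by-run instead of A's per-line prev-state pass; objective: alternative decomposition, same O(n) cost.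

-- ===== PORT A =====
-- literal port of A: fold over lines carrying (new_lines, prev_line)
def remove_double_blanks (lines : List String) : List String :=
  (lines.foldl
    (fun (st : List String × String) line =>
      let new_lines :=
        if PySem.Str.len (PySem.Str.strip line) ≠ 0 ∨ PySem.Str.len (PySem.Str.strip st.2) ≠ 0 then
          st.1 ++ [line]
        else st.1
      (new_lines, line))
    ([], "")).1

-- ===== PORT B =====
-- `not l.strip()` : blankness key
def rdbBlank (l : String) : Bool := PySem.Str.len (PySem.Str.strip l) == 0

-- the outer while loop of Source B: one iteration per run of equal blankness
def rdbGo (result : List String) : List String → List String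
  | [] => result
  | l :: ls =>
    let b := rdbBlank l
    let run := ls.takeWhile (fun x => rdbBlank x == b)
    let rest := ls.dropWhile (fun x => rdbBlank x == b)
    if b then
      rdbGo (if result.isEmpty then result else result ++ [l]) rest
    else
      rdbGo (result ++ l :: run) rest
  termination_by ls => ls.length
  decreasing_by
    all_goals
      exact Nat.lt_succ_of_le (List.length_dropWhile_le _ _)

def remove_double_blanks_alt (lines : List String) : List String :=
  rdbGo [] lines

-- ===== PRECONDITION & SPEC =====
def Spec_remove_double_blanks (lines : List String) (out : List String) : Prop := out = remove_double_blanks_alt lines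
instance (lines : List String) (out : List String) : Decidable (Spec_remove_double_blanks lines out) := by unfold Spec_remove_double_blanks; infer_instance

-- ===== CLAIM (what is proved, stated in full; the proofs are below) =====
def Claim_equal_remove_double_blanks : Prop := ∀ (lines : List String), Dom_remove_double_blanks lines → Spec_remove_double_blanks lines (remove_double_blanks lines)

-- ===== LEMMAS AND PROOFS =====

-- abstract form of A's pass: b = blankness of the previous line
def aGo : Bool → List String → List String
  | _, [] => []
  | b, l :: ls => (if rdbBlank l && b then [] else [l]) ++ aGo (rdbBlank l) ls

lemma aGo_blank_append (xs rest : List String)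
    (h : ∀ x ∈ xs, rdbBlank x = true) : aGo true (xs ++ rest) = aGo true rest := by
  induction xs with
  | nil => rfl
  | cons x xs ih =>
      simp [aGo, h x (by simp), ih (fun y hy => h y (by simp [hy]))]

lemma aGo_nonblank_append (x : String) (xs rest : List String) (b : Bool)
    (h : ∀ y ∈ x :: xs, rdbBlank y = false) : aGo b ((x :: xs) ++ rest) = (x :: xs) ++ aGo false rest := by
  induction xs generalizing x b with
  | nil => simp [aGo, h x (by simp)]
  | cons z zs ih =>
      have hx : rdbBlank x = false := h x (by simp)
      have := ih z false (fun y hy => h y (List.mem_cons_of_mem x hy))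
      simpa [aGo, hx] using this

lemma head?_dropWhile_false (p : String → Bool) (ls : List String) :
    ∀ x, (ls.dropWhile p).head? = some x → p x = false := by
  induction ls with
  | nil => simp [List.dropWhile]
  | cons y ys ih =>
      intro x hx
      by_cases hy : p y
      · exact ih x (by simpa [List.dropWhile, hy] using hx)
      · simp [List.dropWhile, hy] at hx
        subst hx; simpa using hy


lemma rdbGo_nil (r : List String) : rdbGo r [] = r := by rw [rdbGo]

lemma rdbGo_cons (r : List String) (l : String) (ls : List String) :
    rdbGo r (l :: ls) =
      (if rdbBlank l then
        rdbGo (if r.isEmpty then r else r ++ [l])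
          (ls.dropWhile (fun x => rdbBlank x == rdbBlank l))
      else
        rdbGo (r ++ l :: ls.takeWhile (fun x => rdbBlank x == rdbBlank l))
          (ls.dropWhile (fun x => rdbBlank x == rdbBlank l))) := by
  rw [rdbGo]

-- A's foldl computes acc ++ aGo (blankness of prev) lines
lemma a_foldl (lines : List String) (acc : List String) (prev : String) :
    (lines.foldl
      (fun (st : List String × String) line =>
        let new_lines :=
          if PySem.Str.len (PySem.Str.strip line) ≠ 0 ∨ PySem.Str.len (PySem.Str.strip st.2) ≠ 0 then
            st.1 ++ [line]
          else st.1
        (new_lines, line))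
      (acc, prev)).1 = acc ++ aGo (rdbBlank prev) lines := by
  induction lines generalizing acc prev with
  | nil => simp [aGo]
  | cons l ls ih =>
      simp only [List.foldl_cons, ih, aGo, rdbBlank]
      by_cases hl : PySem.Chars.strip l.toList = [] <;>
        by_cases hp : PySem.Chars.strip prev.toList = [] <;>
          simp [hl, hp]

-- B's run loop computes result ++ aGo b lines, whenever b is compatible:
-- if the head is blank then b = false exactly when result is nonempty.
lemma rdbGo_eq (n : Nat) : ∀ (lines : List String), lines.length ≤ n →
    ∀ (r : List String) (b : Bool),
    (∀ l, lines.head? = some l → rdbBlank l = true → (b = false ↔ r ≠ [])) →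
    rdbGo r lines = r ++ aGo b lines := by
  induction n with
  | zero =>
      intro lines hlen r b _
      have : lines = [] := List.eq_nil_of_length_eq_zero (Nat.le_zero.mp hlen)
      subst this; simp [rdbGo_nil, aGo]
  | succ n ih =>
      intro lines hlen r b hcomp
      match lines with
      | [] => simp [rdbGo_nil, aGo]
      | l :: ls =>
        have hsplit : ls = ls.takeWhile (fun x => rdbBlank x == rdbBlank l) ++
            ls.dropWhile (fun x => rdbBlank x == rdbBlank l) :=
          (List.takeWhile_append_dropWhile).symm
        have hrun : ∀ x ∈ ls.takeWhile (fun x => rdbBlank x == rdbBlank l),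
            rdbBlank x = rdbBlank l := by
          intro x hx
          simpa using List.mem_takeWhile_imp hx
        have hrest : ∀ x, (ls.dropWhile (fun x => rdbBlank x == rdbBlank l)).head? = some x →
            rdbBlank x = !rdbBlank l := by
          intro x hx
          have := head?_dropWhile_false (fun x => rdbBlank x == rdbBlank l) ls x hx
          simpa [Bool.eq_not_iff] using this
        have hlenrest : (ls.dropWhile (fun x => rdbBlank x == rdbBlank l)).length ≤ n := by
          have h1 := List.length_dropWhile_le (fun x => rdbBlank x == rdbBlank l) ls
          simp only [List.length_cons] at hlen
          omega
        by_cases hb : rdbBlank l = true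
        · -- blank run
          have hrunT : ∀ x ∈ l :: ls.takeWhile (fun x => rdbBlank x == rdbBlank l),
              rdbBlank x = true := by
            intro x hx
            rcases List.mem_cons.mp hx with h | h
            · subst h; exact hb
            · rw [hrun x h, hb]
          -- head of rest is non-blank, so IH's hypothesis is vacuous for b' := true
          have hIH : rdbGo (if r.isEmpty then r else r ++ [l])
                (ls.dropWhile (fun x => rdbBlank x == rdbBlank l)) =
              (if r.isEmpty then r else r ++ [l]) ++
                aGo true (ls.dropWhile (fun x => rdbBlank x == rdbBlank l)) := by
            apply ih _ hlenrest
            intro x hx hxb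
            exfalso
            have := hrest x hx
            rw [hb] at this; simp [hxb] at this
          have hcomp' := hcomp l rfl hb
          by_cases hr : r = []
          · -- r empty: b must be true; whole blank run dropped
            have hbT : b = true := by
              cases b with
              | false => exact absurd (hcomp'.mp rfl) (by simp [hr])
              | true => rfl
            subst hbT; subst hr
            have hval : aGo true (l :: ls) =
                aGo true (ls.dropWhile (fun x => rdbBlank x == rdbBlank l)) := by
              conv_lhs => rw [show l :: ls =
                (l :: ls.takeWhile (fun x => rdbBlank x == rdbBlank l)) ++
                  ls.dropWhile (fun x => rdbBlank x == rdbBlank l) by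
                  simpa using congrArg (l :: ·) hsplit]
              exact aGo_blank_append _ _ hrunT
            rw [hval]
            rw [rdbGo_cons, if_pos hb]
            simpa using hIH
          · -- r nonempty: b must be false; first blank kept
            have hbF : b = false := hcomp'.mpr hr
            subst hbF
            have hval : aGo false (l :: ls) =
                l :: aGo true (ls.dropWhile (fun x => rdbBlank x == rdbBlank l)) := by
              have hls : aGo (rdbBlank l) ls =
                  aGo true (ls.dropWhile (fun x => rdbBlank x == rdbBlank l)) := by
                conv_lhs => rw [hb, hsplit]
                exact aGo_blank_append _ _ (fun y hy => hrunT y (List.mem_cons_of_mem l hy))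
              simp [aGo, hls]
            rw [hval, rdbGo_cons, if_pos hb, if_neg (by simpa using hr)]
            simp only [List.isEmpty_iff, hr, if_false] at hIH
            simpa using hIH
        · -- non-blank run: copied whole
          have hbF : rdbBlank l = false := by simpa using hb
          have hrunF : ∀ x ∈ l :: ls.takeWhile (fun x => rdbBlank x == rdbBlank l),
              rdbBlank x = false := by
            intro x hx
            rcases List.mem_cons.mp hx with h | h
            · subst h; exact hbF
            · rw [hrun x h, hbF]
          have hIH : rdbGo (r ++ l :: ls.takeWhile (fun x => rdbBlank x == rdbBlank l))
                (ls.dropWhile (fun x => rdbBlank x == rdbBlank l)) =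
              (r ++ l :: ls.takeWhile (fun x => rdbBlank x == rdbBlank l)) ++
                aGo false (ls.dropWhile (fun x => rdbBlank x == rdbBlank l)) := by
            apply ih _ hlenrest
            intro x hx hxb
            constructor
            · intro _; simp
            · intro _; rfl
          have hval : aGo b (l :: ls) =
              (l :: ls.takeWhile (fun x => rdbBlank x == rdbBlank l)) ++
                aGo false (ls.dropWhile (fun x => rdbBlank x == rdbBlank l)) := by
            conv_lhs => rw [show l :: ls =
              (l :: ls.takeWhile (fun x => rdbBlank x == rdbBlank l)) ++
                ls.dropWhile (fun x => rdbBlank x == rdbBlank l) by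
                simpa using congrArg (l :: ·) hsplit]
            exact aGo_nonblank_append _ _ _ _ hrunF
          rw [hval, rdbGo_cons, if_neg (by simp [hbF])]
          simpa using hIH

-- ===== VERDICT (by name: the statement is the Claim_ definition above) =====
theorem remove_double_blanks_spec : Claim_equal_remove_double_blanks := by
  intro lines _
  unfold Spec_remove_double_blanks remove_double_blanks remove_double_blanks_alt
  rw [a_foldl lines [] ""]
  have hprev : rdbBlank "" = true := by decide
  rw [hprev]
  symm
  apply rdbGo_eq lines.length lines le_rfl [] true
  intro l _ _
  simp
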